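-- pv_equiv track=rewrite | github.com/hun23/Daily-Algorithm | PYTHON/class2/1436.py | doom
-- ===== SOURCE A (Python) =====
-- def doom(i):
--     s = str(i)
--     doom_count = 0
--     for c in s:
--         if c == '6':
--             doom_count += 1
--         else:
--             doom_count = 0
--         if doom_count >= 3:
--             return True
--     return False
-- ===== SOURCE B (Python) =====
-- def doom(i):
--     return '666' in str(i)
-- ===== Notes on version B (the rewrite author's own statement) =====
-- stated objective: simpler
-- what changed: Replaces the explicit running-counter loop with early return by a single substring membership test '666' in str(i).
import Mathlib
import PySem

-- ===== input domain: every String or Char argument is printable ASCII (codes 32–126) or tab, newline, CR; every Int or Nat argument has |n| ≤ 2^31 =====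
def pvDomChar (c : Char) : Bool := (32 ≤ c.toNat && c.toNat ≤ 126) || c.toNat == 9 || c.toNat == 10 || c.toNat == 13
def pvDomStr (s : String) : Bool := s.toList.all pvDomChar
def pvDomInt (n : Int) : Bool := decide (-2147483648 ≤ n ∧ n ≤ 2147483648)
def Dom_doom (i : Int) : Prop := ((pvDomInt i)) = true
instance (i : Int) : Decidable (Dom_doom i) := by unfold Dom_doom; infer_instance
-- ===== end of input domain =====

-- B replaces A's running-counter loop with a single substring test '666' in str(i) (simpler).

-- ===== PORT A =====
-- the 'for c in s' loop with the running counter and the early 'return True'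
def doomLoop : List Char → Int → Bool
  | [], _ => false
  | c :: rest, cnt =>
    let cnt' : Int := if c == '6' then cnt + 1 else 0
    if cnt' ≥ 3 then true else doomLoop rest cnt'

def doom (i : Int) : Bool := doomLoop (PySem.Int.toStr i).toList 0

-- ===== PORT B =====
def doom_alt (i : Int) : Bool := PySem.Str.isIn "666" (PySem.Int.toStr i)

-- ===== PRECONDITION & SPEC =====
def Spec_doom (i : Int) (out : Bool) : Prop := out = doom_alt i
instance (i : Int) (out : Bool) : Decidable (Spec_doom i out) := by unfold Spec_doom; infer_instance

-- ===== CLAIM (what is proved, stated in full; the proofs are below) =====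
def Claim_equal_doom : Prop := ∀ (i : Int), Dom_doom i → Spec_doom i (doom i)

-- ===== LEMMAS AND PROOFS =====

theorem doomLoop_key (s : List Char) :
    (doomLoop s 0 = true ↔ ['6','6','6'] <:+: s) ∧
    (doomLoop s 1 = true ↔ (['6','6'] <+: s ∨ ['6','6','6'] <:+: s)) ∧
    (doomLoop s 2 = true ↔ (['6'] <+: s ∨ ['6','6','6'] <:+: s)) := by
  induction s with
  | nil => simp [doomLoop]
  | cons c rest ih =>
    obtain ⟨ih0, ih1, ih2⟩ := ih
    have h21 : (['6','6'] : List Char) <+: rest → (['6'] : List Char) <+: rest :=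
      fun h => List.IsPrefix.trans (by decide) h
    by_cases hc : c = '6'
    · subst hc
      refine ⟨?_, ?_, ?_⟩ <;>
        simp only [doomLoop, beq_self_eq_true, if_true, List.infix_cons_iff,
          List.cons_prefix_cons] <;>
        norm_num [ih0, ih1, ih2] <;> tauto
    · have hc' : ¬ ('6' = c) := fun h => hc h.symm
      have hb : (c == '6') = false := by simp [hc]
      refine ⟨?_, ?_, ?_⟩ <;>
        simp only [doomLoop, hb, List.infix_cons_iff,
          List.cons_prefix_cons] <;>
        norm_num [hc', ih0, ih1, ih2] <;> tauto

theorem doom_spec : Claim_equal_doom := by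
  intro i _
  unfold Spec_doom doom doom_alt
  rw [Bool.eq_iff_iff]
  rw [(doomLoop_key (PySem.Int.toStr i).toList).1, PySem.Str.isIn_iff_infix]
  rfl
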